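-- pv_equiv track=rewrite | github.com/jk-jung/problem-solving | codewars/6kyu/6_Change it up.py | changer
-- ===== SOURCE A (Python) =====
-- def changer(s):
--     r = ''
--     for x in s:
--         if x.isalpha():
--             x = ord(x.lower())
--             if x == ord('z'): x = 'a'
--             else: x = chr(x + 1)
--             if x in 'aeiou':
--                 r += x.upper()
--             else: r += x
--         else: r += x
--
--     return r
-- ===== SOURCE B (Python) =====
-- def changer(s):
--     table = {}
--     for i in range(26):
--         c = chr(ord('a') + i)
--         t = 'a' if c == 'z' else chr(ord(c) + 1)
--         if t in 'aeiou':
--             t = t.upper()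
--         table[ord(c)] = t
--         table[ord(c.upper())] = t
--     return s.translate(table)
-- ===== Notes on version B (the rewrite author's own statement) =====
-- stated objective: idiomatic
-- what changed: B precomputes a str.translate table once over the 26 letters (mapping both cases' codepoints to the shifted, vowel-uppercased letter) and replaces A's per-character branching scan with a single s.translate(table) pass.
import Mathlib
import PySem

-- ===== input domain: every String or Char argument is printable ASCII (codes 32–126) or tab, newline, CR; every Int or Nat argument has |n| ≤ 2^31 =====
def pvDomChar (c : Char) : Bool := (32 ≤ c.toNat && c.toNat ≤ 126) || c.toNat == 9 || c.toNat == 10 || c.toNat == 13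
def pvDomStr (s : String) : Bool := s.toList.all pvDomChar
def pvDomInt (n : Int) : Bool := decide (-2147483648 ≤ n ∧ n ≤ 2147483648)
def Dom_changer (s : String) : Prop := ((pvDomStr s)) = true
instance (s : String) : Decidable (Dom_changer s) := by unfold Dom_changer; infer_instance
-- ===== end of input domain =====

set_option maxRecDepth 20000

-- B builds a str.translate table once over the 26 letters and applies it in one pass (idiomatic).


-- ===== PORT A =====
-- per-character body of A's loop (the value appended to r for one x)
def changerStep (x : Char) : List Char :=
  if PySem.Chars.isalpha x then
    let n := (PySem.Chars.lowerChar x).toNat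
    let y : List Char := if n = 'z'.toNat then ['a'] else [Char.ofNat (n + 1)]
    if PySem.Chars.isIn y ['a','e','i','o','u'] then PySem.Chars.upper y else y
  else [x]

def changer (s : String) : String :=
  String.mk (s.toList.foldl (fun r x => r ++ changerStep x) [])

-- ===== PORT B =====
-- the translate table: for each of the 26 lowercase letters, its shifted
-- (vowel-uppercased) image, keyed by both the lowercase and uppercase codepoint
def changerTable : PySem.Dict Int (List Char) :=
  (PySem.List.pyRange 0 26 1).foldl
    (fun d i =>
      let c := Char.ofNat ('a'.toNat + i.toNat)
      let t : List Char := if c = 'z' then ['a'] else [Char.ofNat (c.toNat + 1)]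
      let t := if PySem.Chars.isIn t ['a','e','i','o','u'] then PySem.Chars.upper t else t
      (d.insert (c.toNat : Int) t).insert (((PySem.Chars.upperChar c).toNat : Int)) t)
    PySem.Dict.empty

-- s.translate(table): each char replaced by its table entry, absent chars kept
def changer_alt (s : String) : String :=
  String.mk (s.toList.flatMap (fun c => changerTable.getD (c.toNat : Int) [c]))

-- ===== PRECONDITION & SPEC =====
def Spec_changer (s : String) (out : String) : Prop := out = changer_alt s
instance (s : String) (out : String) : Decidable (Spec_changer s out) := by unfold Spec_changer; infer_instance

-- ===== CLAIM (what is proved, stated in full; the proofs are below) =====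
def Claim_equal_changer : Prop := ∀ (s : String), Dom_changer s → Spec_changer s (changer s)

-- ===== LEMMAS AND PROOFS =====

-- pointwise agreement of the two per-char transformations on all ASCII codes
theorem step_eq_lookup_ascii :
    ∀ n : Fin 128, changerStep (Char.ofNat n.val) = changerTable.getD ((Char.ofNat n.val).toNat : Int) [Char.ofNat n.val] := by
  decide

theorem step_eq_lookup (c : Char) (h : pvDomChar c = true) :
    changerStep c = changerTable.getD ((c.toNat : Int)) [c] := by
  have hlt : c.toNat < 128 := by
    simp only [pvDomChar, Bool.or_eq_true, Bool.and_eq_true, decide_eq_true_eq,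
      beq_iff_eq, Nat.le_iff_lt_or_eq] at h
    omega
  have hc : Char.ofNat c.toNat = c := Char.ofNat_toNat c
  have := step_eq_lookup_ascii ⟨c.toNat, hlt⟩
  simpa [hc] using this

-- ===== VERDICT (by name: the statement is the Claim_ definition above) =====
theorem changer_spec : Claim_equal_changer := by
  intro s hdom
  unfold Spec_changer changer changer_alt
  rw [PySem.List.foldl_append_eq_flatMap]
  simp only [List.nil_append]
  congr 1
  apply List.flatMap_congr
  intro c hc
  have : pvDomChar c = true := by
    have := hdom
    unfold Dom_changer pvDomStr at this
    exact List.all_eq_true.mp this c hc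
  exact step_eq_lookup c this
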